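-- pv_equiv track=rewrite | github.com/alcides/aeon | scripts/strip_top_level_semicolons.py | _ends_statement_semicolon
-- ===== SOURCE A (Python) =====
-- def _ends_statement_semicolon(line: str) -> bool:
--     body = line.rstrip("\r\n")
--     if not body.rstrip().endswith(";"):
--         return False
--     core = body.rstrip()[:-1].rstrip()
--     in_str = False
--     esc = False
--     for c in core:
--         if esc:
--             esc = False
--             continue
--         if c == "\\":
--             esc = True
--             continue
--         if c == '"':
--             in_str = not in_str
--     return not in_str
-- ===== SOURCE B (Python) =====
-- def _run_of_backslashes(s, i):
--     j = i
--     while j > 0 and s[j - 1] == "\\":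
--         j -= 1
--     return i - j
--
--
-- def _ends_statement_semicolon(line: str) -> bool:
--     body = line.rstrip("\r\n")
--     if not body.rstrip().endswith(";"):
--         return False
--     core = body.rstrip()[:-1].rstrip()
--     quotes = sum(1 for i, c in enumerate(core)
--                  if c == '"' and _run_of_backslashes(core, i) % 2 == 0)
--     return quotes % 2 == 0
-- ===== Notes on version B (the rewrite author's own statement) =====
-- stated objective: alternative
-- what changed: The char-by-char escape/quote state machine (esc, in_str flags) is replaced by a stateless positional count: a quote at index i is effective iff the run of consecutive backslashes just before i has even length, and the line ends a statement iff the number of effective quotes is even.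
import Mathlib
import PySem

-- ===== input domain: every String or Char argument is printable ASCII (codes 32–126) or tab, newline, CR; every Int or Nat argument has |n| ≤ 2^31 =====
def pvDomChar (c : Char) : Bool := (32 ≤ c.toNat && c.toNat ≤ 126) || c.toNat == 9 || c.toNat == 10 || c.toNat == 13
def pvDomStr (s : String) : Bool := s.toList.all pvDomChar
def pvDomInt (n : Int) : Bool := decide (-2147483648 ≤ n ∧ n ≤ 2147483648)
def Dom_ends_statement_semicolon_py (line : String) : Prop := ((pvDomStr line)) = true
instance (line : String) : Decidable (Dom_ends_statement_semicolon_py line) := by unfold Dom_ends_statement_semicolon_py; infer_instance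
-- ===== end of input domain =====

-- B replaces A's escape/quote state machine by a stateless count of quotes preceded by an
-- even backslash run (objective: alternative decomposition; same return value everywhere).

-- ===== PORT A =====
-- exact hand port of str.rstrip("\r\n"): drop trailing '\r'/'\n' characters
def pvRstripCRLF (cs : List Char) : List Char :=
  (cs.reverse.dropWhile (fun c => c == '\r' || c == '\n')).reverse

-- A's loop body: state (in_str, esc)
def pvStepA (st : Bool × Bool) (c : Char) : Bool × Bool :=
  if st.2 then (st.1, false)
  else if c == '\\' then (st.1, true)
  else if c == '"' then (!st.1, st.2)
  else st

def ends_statement_semicolon_py (line : String) : Bool :=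
  let body := pvRstripCRLF line.toList
  if !(PySem.Chars.endswith (PySem.Chars.rstrip body) [';']) then false
  else
    let core := PySem.Chars.rstrip (PySem.List.slice (PySem.Chars.rstrip body) none (some (-1)))
    !(core.foldl pvStepA (false, false)).1

-- ===== PORT B =====
-- port of _run_of_backslashes: the while loop walks j down while s[j-1] is a backslash;
-- every index it reads is in range, so List.getD reads exactly Python's s[j-1]
def pvRunBack (s : List Char) : Nat → Nat
  | 0 => 0
  | j + 1 => if s.getD j ' ' == '\\' then pvRunBack s j + 1 else 0

def ends_statement_semicolon_py_alt (line : String) : Bool :=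
  let body := pvRstripCRLF line.toList
  if !(PySem.Chars.endswith (PySem.Chars.rstrip body) [';']) then false
  else
    let core := PySem.Chars.rstrip (PySem.List.slice (PySem.Chars.rstrip body) none (some (-1)))
    let quotes := (PySem.List.enumerate core 0).countP
        (fun p => p.2 == '"' && pvRunBack core p.1.toNat % 2 == 0)
    quotes % 2 == 0

-- ===== PRECONDITION & SPEC =====
def Spec_ends_statement_semicolon_py (line : String) (out : Bool) : Prop := out = ends_statement_semicolon_py_alt line
instance (line : String) (out : Bool) : Decidable (Spec_ends_statement_semicolon_py line out) := by unfold Spec_ends_statement_semicolon_py; infer_instance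

-- ===== CLAIM (what is proved, stated in full; the proofs are below) =====
def Claim_equal_ends_statement_semicolon_py : Prop := ∀ (line : String), Dom_ends_statement_semicolon_py line → Spec_ends_statement_semicolon_py line (ends_statement_semicolon_py line)

-- ===== LEMMAS AND PROOFS =====

-- B's quote count, as a named abbreviation for the proofs
def pvCountQ (cs : List Char) : Nat :=
  (PySem.List.enumerate cs 0).countP
    (fun p => p.2 == '"' && pvRunBack cs p.1.toNat % 2 == 0)

lemma pvRunBack_append (cs ds : List Char) (j : Nat) (h : j ≤ cs.length) :
    pvRunBack (cs ++ ds) j = pvRunBack cs j := by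
  induction j with
  | zero => rfl
  | succ j ih =>
    have hj : j < cs.length := h
    simp only [pvRunBack, List.getD, List.getElem?_append_left hj, ih (Nat.le_of_lt hj)]
    rfl

lemma pvRunBack_snoc (cs : List Char) (c : Char) :
    pvRunBack (cs ++ [c]) (cs.length + 1) =
      if c == '\\' then pvRunBack cs cs.length + 1 else 0 := by
  simp only [pvRunBack, List.getD, List.getElem?_append_right (Nat.le_refl _),
    Nat.sub_self, List.getElem?_cons_zero, Option.getD_some,
    pvRunBack_append cs [c] cs.length (Nat.le_refl _)]

lemma pvCountQ_snoc (cs : List Char) (c : Char) :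
    pvCountQ (cs ++ [c]) =
      pvCountQ cs +
        (if c == '"' && pvRunBack cs cs.length % 2 == 0 then 1 else 0) := by
  unfold pvCountQ
  rw [PySem.List.enumerate_append, List.countP_append]
  congr 1
  · apply List.countP_congr
    intro p hp
    rcases (PySem.List.mem_enumerate_iff _ _ _).1 hp with ⟨k, hk, rfl⟩
    simp only [Int.zero_add, Int.toNat_natCast]
    rw [pvRunBack_append cs [c] k (Nat.le_of_lt hk)]
  · simp only [PySem.List.enumerate_cons, PySem.List.enumerate_nil,
      List.countP_cons, List.countP_nil, Int.zero_add, Int.toNat_natCast,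
      Nat.zero_add]
    simp only [pvRunBack_append cs [c] cs.length (Nat.le_refl _)]

lemma pvScan_spec (cs : List Char) :
    cs.foldl pvStepA (false, false) =
      (decide (pvCountQ cs % 2 = 1), decide (pvRunBack cs cs.length % 2 = 1)) := by
  induction cs using List.reverseRecOn with
  | nil => decide
  | append_singleton cs c ih =>
    rw [List.foldl_append, ih, pvCountQ_snoc, List.length_append, List.length_singleton,
      pvRunBack_snoc]
    rcases Nat.mod_two_eq_zero_or_one (pvRunBack cs cs.length) with hr | hr
    · by_cases hb : c = '\\'
      · subst hb
        simp [pvStepA, hr]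
        omega
      · by_cases hq : c = '"'
        · subst hq
          rcases Nat.mod_two_eq_zero_or_one (pvCountQ cs) with hq2 | hq2 <;>
            simp [pvStepA, hr, hq2] <;> omega
        · simp [pvStepA, hb, hq, hr]
    · by_cases hb : c = '\\'
      · subst hb
        simp [pvStepA, hr]
        omega
      · by_cases hq : c = '"'
        · subst hq
          simp [pvStepA, hr]
        · simp [pvStepA, hb, hr]

-- ===== VERDICT (by name: the statement is the Claim_ definition above) =====
lemma pvCountQ_def (cs : List Char) :
    (PySem.List.enumerate cs 0).countP
      (fun p => p.2 == '"' && pvRunBack cs p.1.toNat % 2 == 0) = pvCountQ cs := rfl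

theorem ends_statement_semicolon_py_spec : Claim_equal_ends_statement_semicolon_py := by
  intro line _
  simp only [Spec_ends_statement_semicolon_py, ends_statement_semicolon_py,
    ends_statement_semicolon_py_alt]
  by_cases h : PySem.Chars.endswith (PySem.Chars.rstrip (pvRstripCRLF line.toList)) [';'] = true
  · simp only [h, Bool.not_true, Bool.false_eq_true, if_false, pvScan_spec, pvCountQ_def]
    generalize pvCountQ _ = n
    rcases Nat.mod_two_eq_zero_or_one n with h2 | h2 <;> simp [h2]
  · simp only [Bool.not_eq_true] at h
    simp [h]
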